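-- pv_equiv track=rewrite | github.com/macinn/Szemeredi-game | utils.py | has_arithmetic_progression
-- ===== SOURCE A (Python) =====
-- def has_arithmetic_progression(k: int, numbers: list[int]) -> bool:
--     if k <= 1:
--         return True
--     s = set(numbers)
--     sorted_nums = sorted(s)
--     n = len(sorted_nums)
--     for i in range(n):
--         for j in range(i + 1, n):
--             d = sorted_nums[j] - sorted_nums[i]
--             count = 2
--             next_val = sorted_nums[j] + d
--             while next_val in s:
--                 count += 1
--                 if count >= k:
--                     return True
--                 next_val += d
--     return False
-- ===== SOURCE B (Python) =====
-- def has_arithmetic_progression(k: int, numbers: list[int]) -> bool: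
--     if k <= 1:
--         return True
--     s = set(numbers)
--     vals = sorted(s)
--     dp = {}  # (value, diff) -> length of the progression with that diff ending at value (kept only when >= 3)
--     for j in range(1, len(vals)):
--         b = vals[j]
--         for i in range(j):
--             a = vals[i]
--             d = b - a
--             if (a, d) in dp:
--                 cur = dp[(a, d)] + 1
--             elif a - d in s:
--                 cur = 3
--             else:
--                 cur = 2
--             if cur >= k:
--                 return True
--             if cur >= 3:
--                 dp[(b, d)] = cur
--     return False
-- ===== Notes on version B (the rewrite author's own statement) =====
-- stated objective: alternative
-- what changed: Replaces A's try-every-pair-then-walk-the-set extension loop by the longest-arithmetic-subsequence dynamic programme over (value, difference) pairs on the sorted distinct values, storing only chains of length >= 3 and comparing each chain length with k directly.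
-- intended difference: For k = 2 with at least two distinct numbers but no 3-term arithmetic progression, A returns False (its counter is only compared with k after a third term is found), while B returns True, which is intended since any two distinct numbers form a 2-term progression. — e.g. on has_arithmetic_progression(2, [0, 1]): A returns false, B returns true
import Mathlib
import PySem

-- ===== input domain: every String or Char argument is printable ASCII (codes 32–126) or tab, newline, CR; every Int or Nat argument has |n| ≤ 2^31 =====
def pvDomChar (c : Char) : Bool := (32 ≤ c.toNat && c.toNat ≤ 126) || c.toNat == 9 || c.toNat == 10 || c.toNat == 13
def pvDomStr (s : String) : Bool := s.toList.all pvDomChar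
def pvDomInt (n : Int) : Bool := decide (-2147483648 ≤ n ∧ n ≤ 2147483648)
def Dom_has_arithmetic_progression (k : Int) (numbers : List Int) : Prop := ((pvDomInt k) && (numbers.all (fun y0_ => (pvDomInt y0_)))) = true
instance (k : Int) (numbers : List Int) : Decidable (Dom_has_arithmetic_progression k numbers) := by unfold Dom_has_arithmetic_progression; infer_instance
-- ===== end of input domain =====

-- B replaces A's pair-then-walk extension search by the longest-arithmetic-subsequence
-- dynamic programme over (value, difference); for k = 2 with no 3-term progression the two
-- differ intentionally (see D_ below).

-- ===== PORT A =====
-- the while loop 'while next_val in s: …'; fuel s.length suffices: each iteration consumes a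
-- strictly larger member of s (d ≥ 1 for every pair of the sorted distinct list), proved in whileA_iff below
def whileA (s : List Int) (k d : Int) : Nat → Int → Int → Bool
  | 0, _, _ => false
  | fuel+1, count, v =>
    if v ∈ s then
      (if k ≤ count + 1 then true else whileA s k d fuel (count + 1) (v + d))
    else false

def has_arithmetic_progression (k : Int) (numbers : List Int) : Bool :=
  if k ≤ 1 then true
  else
    let s := PySem.Set.ofList numbers
    let vals := PySem.List.sorted s (fun x => x) false
    let n : Int := (vals.length : Int)
    (PySem.List.pyRange 0 n 1).any (fun i =>
      (PySem.List.pyRange (i + 1) n 1).any (fun j =>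
        let a := PySem.List.pyGetD vals i 0
        let b := PySem.List.pyGetD vals j 0
        let d := b - a
        whileA s k d s.length 2 (b + d)))

-- ===== PORT B =====
-- inner loop 'for i in range(j): …' of Source B over the prefix of values before b;
-- 'none' encodes Python's early 'return True'
def innerB (s : List Int) (k b : Int) :
    List Int → PySem.Dict (Int × Int) Int → Option (PySem.Dict (Int × Int) Int)
  | [], dp => some dp
  | a :: rest, dp =>
    let d := b - a
    let cur := if dp.contains (a, d) then dp.getD (a, d) 0 + 1
               else if a - d ∈ s then 3 else 2
    if k ≤ cur then none
    else if 3 ≤ cur then innerB s k b rest (dp.insert (b, d) cur)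
    else innerB s k b rest dp

-- outer loop 'for j in range(1, len(vals)): …': pref is vals[:j], the remaining b's are rest
def outerB (s : List Int) (k : Int) : List Int → List Int → PySem.Dict (Int × Int) Int → Bool
  | _, [], _ => false
  | pref, b :: rest, dp =>
    match innerB s k b pref dp with
    | none => true
    | some dp' => outerB s k (pref ++ [b]) rest dp'

def has_arithmetic_progression_alt (k : Int) (numbers : List Int) : Bool :=
  if k ≤ 1 then true
  else
    let s := PySem.Set.ofList numbers
    let vals := PySem.List.sorted s (fun x => x) false
    outerB s k (vals.take 1) (vals.drop 1) PySem.Dict.empty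

-- ===== PRECONDITION & SPEC =====
-- For k = 2 with at least two distinct numbers but no 3-term arithmetic progression, A returns
-- False (its counter is only compared with k after a third term is found), while B returns True,
-- which is intended since any two distinct numbers form a 2-term progression.
def D_has_arithmetic_progression (k : Int) (numbers : List Int) : Prop :=
  k = 2 ∧ (∃ x ∈ numbers, ∃ y ∈ numbers, x ≠ y) ∧
    ¬ (∃ x ∈ numbers, ∃ y ∈ numbers, x < y ∧ y + (y - x) ∈ numbers)

instance (k : Int) (numbers : List Int) : Decidable (D_has_arithmetic_progression k numbers) := by
  unfold D_has_arithmetic_progression; infer_instance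

def Spec_has_arithmetic_progression (k : Int) (numbers : List Int) (out : Bool) : Prop :=
  ¬ D_has_arithmetic_progression k numbers → out = has_arithmetic_progression_alt k numbers

instance (k : Int) (numbers : List Int) (out : Bool) : Decidable (Spec_has_arithmetic_progression k numbers out) := by
  unfold Spec_has_arithmetic_progression; infer_instance

def pvDiffWitness_has_arithmetic_progression : Int × List Int := (2, [0, 1])
def pvDiffWitnessOut_has_arithmetic_progression : Bool × Bool := (false, true)

-- ===== CLAIM (what is proved, stated in full; the proofs are below) =====
def Claim_unchanged_has_arithmetic_progression : Prop := ∀ (k : Int) (numbers : List Int), Dom_has_arithmetic_progression k numbers → Spec_has_arithmetic_progression k numbers (has_arithmetic_progression k numbers)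
def Claim_changed_has_arithmetic_progression : Prop := Dom_has_arithmetic_progression (pvDiffWitness_has_arithmetic_progression.1) (pvDiffWitness_has_arithmetic_progression.2) ∧ D_has_arithmetic_progression (pvDiffWitness_has_arithmetic_progression.1) (pvDiffWitness_has_arithmetic_progression.2) ∧ has_arithmetic_progression (pvDiffWitness_has_arithmetic_progression.1) (pvDiffWitness_has_arithmetic_progression.2) = pvDiffWitnessOut_has_arithmetic_progression.1 ∧ has_arithmetic_progression_alt (pvDiffWitness_has_arithmetic_progression.1) (pvDiffWitness_has_arithmetic_progression.2) = pvDiffWitnessOut_has_arithmetic_progression.2 ∧ pvDiffWitnessOut_has_arithmetic_progression.1 ≠ pvDiffWitnessOut_has_arithmetic_progression.2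
def Claim_exact_has_arithmetic_progression : Prop := ∀ (k : Int) (numbers : List Int), Dom_has_arithmetic_progression k numbers → D_has_arithmetic_progression k numbers → has_arithmetic_progression k numbers ≠ has_arithmetic_progression_alt k numbers

-- ===== LEMMAS AND PROOFS =====

-- the common mathematical yardstick: an arithmetic progression of m distinct terms inside nums
def hasAP (nums : List Int) (m : Nat) : Prop :=
  ∃ a d : Int, 1 ≤ d ∧ ∀ i : Nat, i < m → a + (i : Int) * d ∈ nums

-- backward chain length: number of consecutive terms b, b-d, b-2d, … present in nums (fueled)
def chainF (nums : List Int) (d : Int) : Nat → Int → Nat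
  | 0, _ => 0
  | f+1, b => if b ∈ nums then chainF nums d f (b - d) + 1 else 0

def chainLen (nums : List Int) (d b : Int) : Nat := chainF nums d nums.length b

lemma chainF_succ_def (nums : List Int) (d : Int) (f : Nat) (b : Int) :
    chainF nums d (f + 1) b = if b ∈ nums then chainF nums d f (b - d) + 1 else 0 := rfl

lemma chainF_mem (nums : List Int) (d : Int) :
    ∀ (f : Nat) (b : Int) (u : Nat), u < chainF nums d f b → b - (u : Int) * d ∈ nums := by
  intro f
  induction f with
  | zero => intro b u h; simp [chainF] at h
  | succ f ih =>
    intro b u h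
    by_cases hb : b ∈ nums
    · simp only [chainF, if_pos hb] at h
      cases u with
      | zero => simpa using hb
      | succ u' =>
        have h' : u' < chainF nums d f (b - d) := by omega
        have := ih (b - d) u' h'
        have heq : b - ((u' + 1 : Nat) : Int) * d = b - d - (u' : Int) * d := by push_cast; ring
        rwa [heq]
    · simp [chainF, hb] at h

lemma le_chainF (nums : List Int) (d : Int) :
    ∀ (t f : Nat) (b : Int), t ≤ f → (∀ u : Nat, u < t → b - (u : Int) * d ∈ nums) →
      t ≤ chainF nums d f b := by
  intro t
  induction t with
  | zero => intro f b _ _; omega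
  | succ t ih =>
    intro f b hf hall
    obtain ⟨f', rfl⟩ : ∃ f', f = f' + 1 := ⟨f - 1, by omega⟩
    have hb : b ∈ nums := by simpa using hall 0 (by omega)
    simp only [chainF, if_pos hb]
    have : t ≤ chainF nums d f' (b - d) := by
      refine ih f' (b - d) (by omega) ?_
      intro u hu
      have := hall (u + 1) (by omega)
      have heq : b - d - (u : Int) * d = b - ((u + 1 : Nat) : Int) * d := by push_cast; ring
      rwa [heq]
    omega

lemma chainF_stable (nums : List Int) {d : Int} (hd : 1 ≤ d) :
    ∀ (f : Nat) (b : Int), (nums.toFinset.filter (· ≤ b)).card ≤ f →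
      chainF nums d (f + 1) b = chainF nums d f b := by
  intro f
  induction f with
  | zero =>
    intro b hcard
    have hb : b ∉ nums := by
      intro hb
      have : b ∈ nums.toFinset.filter (· ≤ b) := by
        simp [List.mem_toFinset, hb]
      have := Finset.card_pos.mpr ⟨b, this⟩
      omega
    simp [chainF, hb]
  | succ f ih =>
    intro b hcard
    by_cases hb : b ∈ nums
    · have e1 : chainF nums d (f + 1 + 1) b = chainF nums d (f + 1) (b - d) + 1 := by
        rw [chainF_succ_def, if_pos hb]
      have e2 : chainF nums d (f + 1) b = chainF nums d f (b - d) + 1 := by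
        rw [chainF_succ_def, if_pos hb]
      have hsub : nums.toFinset.filter (· ≤ b - d) ⊆ (nums.toFinset.filter (· ≤ b)).erase b := by
        intro x hx
        simp only [Finset.mem_filter, Finset.mem_erase] at hx ⊢
        exact ⟨by omega, hx.1, by omega⟩
      have hbmem : b ∈ nums.toFinset.filter (· ≤ b) := by simp [List.mem_toFinset, hb]
      have hcard' : (nums.toFinset.filter (· ≤ b - d)).card ≤ f := by
        have h1 := Finset.card_le_card hsub
        have h2 := Finset.card_erase_of_mem hbmem
        omega
      rw [e1, e2, ih (b - d) hcard']
    · simp [chainF_succ_def, hb]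

lemma chainF_eq_of_le (nums : List Int) {d : Int} (hd : 1 ≤ d) (b : Int) :
    ∀ {f g : Nat}, (nums.toFinset.filter (· ≤ b)).card ≤ f → f ≤ g →
      chainF nums d g b = chainF nums d f b := by
  intro f g hcf hfg
  obtain ⟨n, rfl⟩ : ∃ n, g = f + n := ⟨g - f, by omega⟩
  induction n with
  | zero => rfl
  | succ n ihn =>
    have : f + (n + 1) = (f + n) + 1 := by omega
    rw [this, chainF_stable nums hd (f + n) b (by omega), ihn (by omega)]

lemma chainLen_succ (nums : List Int) {d b : Int} (hd : 1 ≤ d) (hb : b ∈ nums) :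
    chainLen nums d b = chainLen nums d (b - d) + 1 := by
  have hlen : 1 ≤ nums.length := List.length_pos_iff.mpr (by rintro rfl; simp at hb)
  obtain ⟨L, hL⟩ : ∃ L, nums.length = L + 1 := ⟨nums.length - 1, by omega⟩
  have hcard : (nums.toFinset.filter (· ≤ b - d)).card ≤ L := by
    have hsub : nums.toFinset.filter (· ≤ b - d) ⊆ nums.toFinset.erase b := by
      intro x hx
      simp only [Finset.mem_filter, Finset.mem_erase] at hx ⊢
      exact ⟨by omega, hx.1⟩
    have h1 := Finset.card_le_card hsub
    have h2 := Finset.card_erase_of_mem (by simp [List.mem_toFinset, hb] :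
      b ∈ nums.toFinset)
    have h3 := nums.toFinset_card_le
    omega
  unfold chainLen
  rw [hL]
  rw [chainF_succ_def, if_pos hb]
  rw [chainF_eq_of_le nums hd (b - d) hcard (by omega : L ≤ L + 1)]

lemma chainLen_zero (nums : List Int) {d b : Int} (hb : b ∉ nums) :
    chainLen nums d b = 0 := by
  unfold chainLen
  cases nums.length with
  | zero => simp [chainF]
  | succ f => simp [chainF, hb]

lemma hasAP_mono (nums : List Int) {m m' : Nat} (h : m' ≤ m) : hasAP nums m → hasAP nums m' := by
  rintro ⟨a, d, hd, hall⟩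
  exact ⟨a, d, hd, fun i hi => hall i (by omega)⟩

lemma hasAP_le_length (nums : List Int) {m : Nat} (h : hasAP nums m) : m ≤ nums.length := by
  obtain ⟨a, d, hd, hall⟩ := h
  have hinj : ∀ i ∈ Finset.range m, ∀ j ∈ Finset.range m,
      a + (i : Int) * d = a + (j : Int) * d → i = j := by
    intro i _ j _ hij
    have : (i : Int) * d = (j : Int) * d := by omega
    have := mul_right_cancel₀ (by omega : d ≠ 0) this
    exact_mod_cast this
  have hmap : ∀ i ∈ Finset.range m, a + (i : Int) * d ∈ nums.toFinset := by
    intro i hi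
    simp only [Finset.mem_range] at hi
    simp [List.mem_toFinset, hall i hi]
  have := Finset.card_le_card_of_injOn _ hmap hinj
  simpa using this.trans nums.toFinset_card_le

lemma chain_to_AP (nums : List Int) {a b : Int} {m : Nat} (hab : a < b)
    (hm : m ≤ chainLen nums (b - a) b) : hasAP nums m := by
  rcases Nat.eq_zero_or_pos m with hm0 | hm0
  · exact ⟨0, 1, le_refl _, by omega⟩
  · set d := b - a with hd
    refine ⟨b - ((m : Int) - 1) * d, d, by omega, ?_⟩
    intro i hi
    have h := chainF_mem nums d nums.length b (m - 1 - i) (by unfold chainLen at hm; omega)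
    have heq : b - ((m : Int) - 1) * d + (i : Int) * d = b - ((m - 1 - i : Nat) : Int) * d := by
      have : ((m - 1 - i : Nat) : Int) = (m : Int) - 1 - (i : Int) := by omega
      rw [this]; ring
    rwa [heq]

lemma AP_to_chain (nums : List Int) {m : Nat} (hm : 2 ≤ m) (h : hasAP nums m) :
    ∃ a b : Int, a ∈ nums ∧ b ∈ nums ∧ a < b ∧ m ≤ chainLen nums (b - a) b := by
  obtain ⟨a0, d, hd, hall⟩ := h
  refine ⟨a0 + ((m : Int) - 2) * d, a0 + ((m : Int) - 1) * d, ?_, ?_, by nlinarith, ?_⟩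
  · have := hall (m - 2) (by omega)
    have heq : a0 + ((m - 2 : Nat) : Int) * d = a0 + ((m : Int) - 2) * d := by
      have : ((m - 2 : Nat) : Int) = (m : Int) - 2 := by omega
      rw [this]
    rwa [heq] at this
  · have := hall (m - 1) (by omega)
    have heq : a0 + ((m - 1 : Nat) : Int) * d = a0 + ((m : Int) - 1) * d := by
      have : ((m - 1 : Nat) : Int) = (m : Int) - 1 := by omega
      rw [this]
    rwa [heq] at this
  · have hdd : a0 + ((m : Int) - 1) * d - (a0 + ((m : Int) - 2) * d) = d := by ring
    rw [hdd]
    refine le_chainF nums d m nums.length _ (hasAP_le_length nums ⟨a0, d, hd, hall⟩) ?_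
    intro u hu
    have := hall (m - 1 - u) (by omega)
    have heq : a0 + ((m - 1 - u : Nat) : Int) * d = a0 + ((m : Int) - 1) * d - (u : Int) * d := by
      have : ((m - 1 - u : Nat) : Int) = (m : Int) - 1 - (u : Int) := by omega
      rw [this]; ring
    rwa [heq] at this

-- ===== A-side characterization =====

lemma whileA_iff (s : List Int) (k d : Int) (hd : 1 ≤ d) :
    ∀ (f : Nat) (count v : Int), (s.toFinset.filter (fun x => v ≤ x)).card ≤ f →
      (whileA s k d f count v = true ↔
        ∀ i : Nat, i < (max (k - count) 1).toNat → v + (i : Int) * d ∈ s) := by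
  intro f
  induction f with
  | zero =>
    intro count v hcard
    have hv : v ∉ s := by
      intro hv
      have : v ∈ s.toFinset.filter (fun x => v ≤ x) := by simp [List.mem_toFinset, hv]
      have := Finset.card_pos.mpr ⟨v, this⟩
      omega
    simp only [whileA]
    constructor
    · intro h; exact absurd h (by simp)
    · intro h
      have h0 := h 0 (by have : (1 : Int) ≤ max (k - count) 1 := le_max_right _ _; omega)
      simp at h0
      exact absurd h0 hv
  | succ f ih =>
    intro count v hcard
    simp only [whileA]
    by_cases hv : v ∈ s
    · rw [if_pos hv]
      by_cases hk : k ≤ count + 1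
      · rw [if_pos hk]
        have hmax : max (k - count) 1 = 1 := max_eq_right (by omega)
        constructor
        · intro _ i hi
          rw [hmax] at hi
          have hi0 : i = 0 := by omega
          subst hi0
          simpa using hv
        · intro _; rfl
      · rw [if_neg hk]
        have hcard' : (s.toFinset.filter (fun x => v + d ≤ x)).card ≤ f := by
          have hsub : s.toFinset.filter (fun x => v + d ≤ x) ⊆
              (s.toFinset.filter (fun x => v ≤ x)).erase v := by
            intro x hx
            simp only [Finset.mem_filter, Finset.mem_erase] at hx ⊢
            exact ⟨by omega, hx.1, by omega⟩
          have h1 := Finset.card_le_card hsub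
          have h2 := Finset.card_erase_of_mem
            (by simp [List.mem_toFinset, hv] : v ∈ s.toFinset.filter (fun x => v ≤ x))
          omega
        rw [ih (count + 1) (v + d) hcard']
        have hm1 : max (k - count) 1 = k - count := max_eq_left (by omega : (1:Int) ≤ k - count)
        have hm2 : max (k - (count + 1)) 1 = k - (count + 1) :=
          max_eq_left (by omega : (1:Int) ≤ k - (count + 1))
        constructor
        · intro h i hi
          rw [hm1] at hi
          cases i with
          | zero => simpa using hv
          | succ i' =>
            have := h i' (by rw [hm2]; omega)
            have heq : v + d + (i' : Int) * d = v + ((i' + 1 : Nat) : Int) * d := by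
              push_cast; ring
            rwa [heq] at this
        · intro h i hi
          rw [hm2] at hi
          have := h (i + 1) (by rw [hm1]; omega)
          have heq : v + ((i + 1 : Nat) : Int) * d = v + d + (i : Int) * d := by
            push_cast; ring
          rwa [heq] at this
    · rw [if_neg hv]
      constructor
      · intro h; exact absurd h (by simp)
      · intro h
        have h0 := h 0 (by have : (1 : Int) ≤ max (k - count) 1 := le_max_right _ _; omega)
        simp at h0
        exact absurd h0 hv

lemma anyany_iff (vals : List Int) (g : Int → Int → Bool) :
    ((PySem.List.pyRange 0 (vals.length : Int) 1).any (fun i =>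
       (PySem.List.pyRange (i + 1) (vals.length : Int) 1).any (fun j =>
          g (PySem.List.pyGetD vals i 0) (PySem.List.pyGetD vals j 0))) = true)
    ↔ ∃ p q : Nat, p < q ∧ q < vals.length ∧ g (vals.getD p 0) (vals.getD q 0) = true := by
  simp only [List.any_eq_true]
  constructor
  · rintro ⟨i, hi, j, hj, hg⟩
    rw [PySem.List.mem_pyRange_one] at hi hj
    refine ⟨i.toNat, j.toNat, by omega, by omega, ?_⟩
    rwa [PySem.List.pyGetD_of_nonneg _ _ (by omega), PySem.List.pyGetD_of_nonneg _ _ (by omega)]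
      at hg
  · rintro ⟨p, q, hpq, hq, hg⟩
    refine ⟨(p : Int), ?_, (q : Int), ?_, ?_⟩
    · rw [PySem.List.mem_pyRange_one]; omega
    · rw [PySem.List.mem_pyRange_one]; omega
    · rwa [PySem.List.pyGetD_natCast, PySem.List.pyGetD_natCast]

lemma indices_of_mem_lt {vals : List Int} (hpw : vals.Pairwise (· < ·)) {a b : Int}
    (ha : a ∈ vals) (hb : b ∈ vals) (hab : a < b) :
    ∃ p q : Nat, p < q ∧ q < vals.length ∧ vals.getD p 0 = a ∧ vals.getD q 0 = b := by
  obtain ⟨p, hp, hpa⟩ := List.getElem_of_mem ha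
  obtain ⟨q, hq, hqb⟩ := List.getElem_of_mem hb
  have hmono := List.pairwise_iff_getElem.mp hpw
  have hpq : p < q := by
    rcases lt_trichotomy p q with h | h | h
    · exact h
    · subst h; rw [hpa] at hqb; omega
    · have := hmono q p hq hp h; rw [hpa, hqb] at this; omega
  exact ⟨p, q, hpq, hq, by rw [List.getD_eq_getElem _ _ hp]; exact hpa,
    by rw [List.getD_eq_getElem _ _ hq]; exact hqb⟩

def valsOf (nums : List Int) : List Int :=
  PySem.List.sorted (PySem.Set.ofList nums) (fun x => x) false

lemma valsOf_mem (nums : List Int) (x : Int) : x ∈ valsOf nums ↔ x ∈ nums := by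
  unfold valsOf
  rw [PySem.List.mem_sorted, PySem.Set.mem_ofList]

lemma valsOf_pairwise (nums : List Int) : (valsOf nums).Pairwise (· < ·) :=
  PySem.List.sorted_ofList_pairwise_lt nums

lemma A_eq (k : Int) (nums : List Int) (hk : ¬ k ≤ 1) :
    has_arithmetic_progression k nums =
      ((PySem.List.pyRange 0 ((valsOf nums).length : Int) 1).any (fun i =>
        (PySem.List.pyRange (i + 1) ((valsOf nums).length : Int) 1).any (fun j =>
          (fun a b => whileA (PySem.Set.ofList nums) k (b - a) (PySem.Set.ofList nums).length 2
              (b + (b - a)))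
            (PySem.List.pyGetD (valsOf nums) i 0) (PySem.List.pyGetD (valsOf nums) j 0)))) := by
  unfold has_arithmetic_progression valsOf
  rw [if_neg hk]

lemma A_iff (k : Int) (nums : List Int) (hk : 2 ≤ k) :
    (has_arithmetic_progression k nums = true ↔ hasAP nums (max k 3).toNat) := by
  have hmem := valsOf_mem nums
  have hpw := valsOf_pairwise nums
  have hsmem : ∀ x : Int, x ∈ PySem.Set.ofList nums ↔ x ∈ nums := fun x =>
    PySem.Set.mem_ofList nums x
  have hcardfuel : ∀ v : Int,
      ((PySem.Set.ofList nums).toFinset.filter (fun x => v ≤ x)).card ≤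
        (PySem.Set.ofList nums).length := fun v =>
    (Finset.card_le_card (Finset.filter_subset _ _)).trans (PySem.Set.ofList nums).toFinset_card_le
  have hmaxnat : (max k 3).toNat = (max (k - 2) 1).toNat + 2 := by
    rcases max_cases k 3 with ⟨h1, h2⟩ | ⟨h1, h2⟩ <;>
      rcases max_cases (k - 2) 1 with ⟨h3, h4⟩ | ⟨h3, h4⟩ <;> omega
  rw [A_eq k nums (by omega)]
  refine Iff.trans (anyany_iff (valsOf nums)
    (fun a b => whileA (PySem.Set.ofList nums) k (b - a) (PySem.Set.ofList nums).length 2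
      (b + (b - a)))) ?_
  constructor
  · rintro ⟨p, q, hpq, hq, hg⟩
    set a := (valsOf nums).getD p 0 with hadef
    set b := (valsOf nums).getD q 0 with hbdef
    have hp : p < (valsOf nums).length := by omega
    have hav : a ∈ valsOf nums := by
      rw [hadef, List.getD_eq_getElem _ _ hp]; exact List.getElem_mem _
    have hbv : b ∈ valsOf nums := by
      rw [hbdef, List.getD_eq_getElem _ _ hq]; exact List.getElem_mem _
    have hab : a < b := by
      have := List.pairwise_iff_getElem.mp hpw p q hp hq hpq
      rw [hadef, hbdef, List.getD_eq_getElem _ _ hp, List.getD_eq_getElem _ _ hq]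
      exact this
    have hd : 1 ≤ b - a := by omega
    rw [whileA_iff (PySem.Set.ofList nums) k (b - a) hd (PySem.Set.ofList nums).length 2
      (b + (b - a)) (hcardfuel _)] at hg
    refine ⟨a, b - a, hd, ?_⟩
    intro i hi
    rw [hmaxnat] at hi
    match i, hi with
    | 0, _ => simpa using (hmem a).mp hav
    | 1, _ =>
      have h1 : a + ((1 : Nat) : Int) * (b - a) = b := by push_cast; ring
      rw [h1]; exact (hmem b).mp hbv
    | (i' + 2), hi =>
      have hgi := hg i' (by omega)
      rw [hsmem] at hgi
      have heq : a + ((i' + 2 : Nat) : Int) * (b - a) = b + (b - a) + (i' : Int) * (b - a) := by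
        push_cast; ring
      rwa [heq]
  · rintro ⟨a0, d, hd, hall⟩
    have ha0 : a0 ∈ nums := by simpa using hall 0 (by omega)
    have hb0 : a0 + d ∈ nums := by
      have := hall 1 (by omega); push_cast at this; simpa using this
    obtain ⟨p, q, hpq, hq, hpa, hqb⟩ :=
      indices_of_mem_lt hpw ((hmem a0).mpr ha0) ((hmem (a0 + d)).mpr hb0) (by omega)
    refine ⟨p, q, hpq, hq, ?_⟩
    show whileA _ _ _ _ _ _ = true
    rw [hpa, hqb]
    have hdd : a0 + d - a0 = d := by ring
    rw [hdd, whileA_iff (PySem.Set.ofList nums) k d hd (PySem.Set.ofList nums).length 2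
      (a0 + d + d) (hcardfuel _)]
    intro i hi
    rw [hsmem]
    have := hall (i + 2) (by omega)
    have heq : a0 + ((i + 2 : Nat) : Int) * d = a0 + d + d + (i : Int) * d := by push_cast; ring
    rwa [heq] at this

-- ===== B-side characterization =====

-- invariant for the sparse dp: keys live on processed rows; a stored value is the exact chain
-- length (≥ 3 is implicit in how it got stored); an absent key means the chain has length ≤ 2
def InvD (nums : List Int) (p : List Int) (dp : PySem.Dict (Int × Int) Int) : Prop :=
  (∀ x d : Int, dp.contains (x, d) = true → x ∈ p) ∧
  (∀ a ∈ p, ∀ d : Int, 1 ≤ d →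
    (dp.contains (a, d) = true → dp.getD (a, d) 0 = (chainLen nums d a : Int)) ∧
    (dp.contains (a, d) = false → chainLen nums d a ≤ 2))

lemma chainLen_pos (nums : List Int) {d b : Int} (hd : 1 ≤ d) (hb : b ∈ nums) :
    1 ≤ chainLen nums d b := by
  rw [chainLen_succ nums hd hb]; omega

lemma innerB_go (nums s : List Int) (hsm : ∀ x : Int, x ∈ s ↔ x ∈ nums) (k b : Int)
    (hbnum : b ∈ nums) (P : List Int) (hPnum : ∀ x ∈ P, x ∈ nums)
    (hPlt : ∀ x ∈ P, x < b) (hPnodup : P.Nodup) :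
    ∀ (l q : List Int) (dp : PySem.Dict (Int × Int) Int), q ++ l = P →
      (∀ x d : Int, dp.contains (x, d) = true → x ∈ P ∨ (x = b ∧ b - d ∈ q)) →
      (∀ a ∈ P, ∀ d : Int, 1 ≤ d →
        (dp.contains (a, d) = true → dp.getD (a, d) 0 = (chainLen nums d a : Int)) ∧
        (dp.contains (a, d) = false → chainLen nums d a ≤ 2)) →
      (∀ d : Int, 1 ≤ d → b - d ∈ q →
        (dp.contains (b, d) = true → dp.getD (b, d) 0 = (chainLen nums d b : Int)) ∧
        (dp.contains (b, d) = false → chainLen nums d b ≤ 2)) →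
      ((innerB s k b l dp = none ↔
          ∃ a ∈ l, k ≤ ((chainLen nums (b - a) b : Nat) : Int))
        ∧ ∀ dp', innerB s k b l dp = some dp' →
            ((∀ x d : Int, dp'.contains (x, d) = true → x ∈ P ∨ (x = b ∧ b - d ∈ q ++ l))
              ∧ (∀ a ∈ P, ∀ d : Int, 1 ≤ d →
                  (dp'.contains (a, d) = true → dp'.getD (a, d) 0 = (chainLen nums d a : Int)) ∧
                  (dp'.contains (a, d) = false → chainLen nums d a ≤ 2))
              ∧ (∀ d : Int, 1 ≤ d → b - d ∈ q ++ l →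
                  (dp'.contains (b, d) = true → dp'.getD (b, d) 0 = (chainLen nums d b : Int)) ∧
                  (dp'.contains (b, d) = false → chainLen nums d b ≤ 2)))) := by
  have hbP : b ∉ P := fun h => absurd (hPlt b h) (by omega)
  intro l
  induction l with
  | nil =>
    intro q dp hqP hc hp hb'
    simp only [List.append_nil] at hqP
    subst hqP
    refine ⟨by simp [innerB], ?_⟩
    intro dp' hdp'
    have : dp = dp' := by simpa [innerB] using hdp'
    subst this
    exact ⟨fun x d hx => (hc x d hx).imp id (fun h => ⟨h.1, by simpa using h.2⟩), hp,
      fun d hd hbd => hb' d hd (by simpa using hbd)⟩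
  | cons a rest ih =>
    intro q dp hqP hc hp hb'
    have haP : a ∈ P := by rw [← hqP]; simp
    have hanum : a ∈ nums := hPnum a haP
    have hab : a < b := hPlt a haP
    have hd0 : (1 : Int) ≤ b - a := by omega
    have haq : a ∉ q := by
      intro hq
      have : ¬ (q ++ a :: rest).Nodup := by
        intro hnd
        have := (List.disjoint_of_nodup_append hnd) hq (by simp)
        exact this
      exact this (hqP ▸ hPnodup)
    -- the computed cur is exactly the chain length ending at b with difference b - a
    have hcur : (if dp.contains (a, b - a) then dp.getD (a, b - a) 0 + 1
          else if a - (b - a) ∈ s then 3 else 2) = ((chainLen nums (b - a) b : Nat) : Int) := by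
      have hrec : chainLen nums (b - a) b = chainLen nums (b - a) a + 1 := by
        have := chainLen_succ nums hd0 hbnum
        have hba : b - (b - a) = a := by ring
        rwa [hba] at this
      by_cases hcont : dp.contains (a, b - a) = true
      · rw [if_pos hcont, (hp a haP (b - a) hd0).1 hcont, hrec]
        push_cast; ring
      · rw [if_neg (by simpa using hcont)]
        have hle2 := (hp a haP (b - a) hd0).2 (by simpa using hcont)
        by_cases had : a - (b - a) ∈ s
        · rw [if_pos had]
          have hadnum : a - (b - a) ∈ nums := (hsm _).mp had
          have hrec2 : chainLen nums (b - a) a = chainLen nums (b - a) (a - (b - a)) + 1 :=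
            chainLen_succ nums hd0 hanum
          have hpos := chainLen_pos nums hd0 hadnum
          have : chainLen nums (b - a) a = 2 := by omega
          rw [hrec, this]; norm_num
        · rw [if_neg had]
          have hadnum : a - (b - a) ∉ nums := fun h => had ((hsm _).mpr h)
          have : chainLen nums (b - a) a = chainLen nums (b - a) (a - (b - a)) + 1 :=
            chainLen_succ nums hd0 hanum
          rw [chainLen_zero nums hadnum] at this
          rw [hrec, this]; norm_num
    simp only [innerB, hcur]
    by_cases hke : k ≤ ((chainLen nums (b - a) b : Nat) : Int)
    · rw [if_pos hke]
      refine ⟨⟨fun _ => ⟨a, by simp, hke⟩, fun _ => rfl⟩, ?_⟩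
      intro dp' hdp'; exact absurd hdp' (by simp)
    · rw [if_neg hke]
      have hassoc : (q ++ [a]) ++ rest = P := by rw [← hqP]; simp
      by_cases h3 : (3 : Int) ≤ ((chainLen nums (b - a) b : Nat) : Int)
      · rw [if_pos h3]
        have hc' : ∀ x d : Int,
            (dp.insert (b, b - a) ((chainLen nums (b - a) b : Nat) : Int)).contains (x, d) = true →
              x ∈ P ∨ (x = b ∧ b - d ∈ q ++ [a]) := by
          intro x d hx
          rw [PySem.Dict.contains_insert] at hx
          rcases Bool.or_eq_true_iff.mp hx with h | h
          · have heqp : (x, d) = (b, b - a) := eq_of_beq h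
            have hx1 : x = b := congrArg Prod.fst heqp
            have hx2 : d = b - a := congrArg Prod.snd heqp
            refine Or.inr ⟨hx1, ?_⟩
            rw [hx2]
            have hba : b - (b - a) = a := by ring
            rw [hba]; simp
          · rcases hc x d h with h' | ⟨h1, h2⟩
            · exact Or.inl h'
            · exact Or.inr ⟨h1, by simp [h2]⟩
        have hp' : ∀ a' ∈ P, ∀ d : Int, 1 ≤ d →
            ((dp.insert (b, b - a) ((chainLen nums (b - a) b : Nat) : Int)).contains (a', d) = true →
              (dp.insert (b, b - a) ((chainLen nums (b - a) b : Nat) : Int)).getD (a', d) 0 =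
                (chainLen nums d a' : Int)) ∧
            ((dp.insert (b, b - a) ((chainLen nums (b - a) b : Nat) : Int)).contains (a', d) = false →
              chainLen nums d a' ≤ 2) := by
          intro a' ha' d hd
          have hne : (a', d) ≠ (b, b - a) := by
            intro h
            have : a' = b := congrArg Prod.fst h
            exact hbP (this ▸ ha')
          constructor
          · intro hcont
            rw [PySem.Dict.contains_insert] at hcont
            rcases Bool.or_eq_true_iff.mp hcont with h | h
            · exact absurd (eq_of_beq h) hne
            · rw [PySem.Dict.getD_insert, if_neg hne]
              exact (hp a' ha' d hd).1 h
          · intro hcont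
            rw [PySem.Dict.contains_insert] at hcont
            have : dp.contains (a', d) = false := by
              rcases hdc : dp.contains (a', d) with _ | _
              · rfl
              · rw [hdc] at hcont; simp at hcont
            exact (hp a' ha' d hd).2 this
        have hb'' : ∀ d : Int, 1 ≤ d → b - d ∈ q ++ [a] →
            ((dp.insert (b, b - a) ((chainLen nums (b - a) b : Nat) : Int)).contains (b, d) = true →
              (dp.insert (b, b - a) ((chainLen nums (b - a) b : Nat) : Int)).getD (b, d) 0 =
                (chainLen nums d b : Int)) ∧
            ((dp.insert (b, b - a) ((chainLen nums (b - a) b : Nat) : Int)).contains (b, d) = false →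
              chainLen nums d b ≤ 2) := by
          intro d hd hbd
          by_cases hcase : d = b - a
          · subst hcase
            constructor
            · intro _
              rw [PySem.Dict.getD_insert, if_pos rfl]
            · intro hcont
              rw [PySem.Dict.contains_insert] at hcont
              simp at hcont
          · have hne : ((b, d) : Int × Int) ≠ (b, b - a) := by
              intro h; exact hcase (congrArg Prod.snd h)
            have hbq : b - d ∈ q := by
              rcases List.mem_append.mp hbd with h | h
              · exact h
              · exfalso
                have : b - d = a := by simpa using h
                exact hcase (by omega)
            constructor
            · intro hcont
              rw [PySem.Dict.contains_insert] at hcont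
              rcases Bool.or_eq_true_iff.mp hcont with h | h
              · exact absurd (eq_of_beq h) hne
              · rw [PySem.Dict.getD_insert, if_neg hne]
                exact (hb' d hd hbq).1 h
            · intro hcont
              rw [PySem.Dict.contains_insert] at hcont
              have : dp.contains (b, d) = false := by
                rcases hdc : dp.contains (b, d) with _ | _
                · rfl
                · rw [hdc] at hcont; simp at hcont
              exact (hb' d hd hbq).2 this
        obtain ⟨c1, c2⟩ := ih (q ++ [a])
          (dp.insert (b, b - a) ((chainLen nums (b - a) b : Nat) : Int)) hassoc hc' hp' hb''
        refine ⟨?_, ?_⟩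
        · rw [c1]
          constructor
          · rintro ⟨a', ha', hk'⟩; exact ⟨a', by simp [ha'], hk'⟩
          · rintro ⟨a', ha', hk'⟩
            rcases List.mem_cons.mp ha' with rfl | ha''
            · exact absurd hk' hke
            · exact ⟨a', ha'', hk'⟩
        · intro dp' hdp'
          obtain ⟨d1, d2, d3⟩ := c2 dp' hdp'
          refine ⟨?_, d2, ?_⟩
          · intro x d hx
            rcases d1 x d hx with h | ⟨h1, h2⟩
            · exact Or.inl h
            · refine Or.inr ⟨h1, ?_⟩
              have hmm : b - d ∈ (q ++ [a]) ++ rest := h2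
              simpa using hmm
          · intro d hd hbd
            refine d3 d hd ?_
            have hmm : b - d ∈ (q ++ [a]) ++ rest := by simpa using hbd
            exact hmm
      · rw [if_neg h3]
        have hc' : ∀ x d : Int, dp.contains (x, d) = true →
            x ∈ P ∨ (x = b ∧ b - d ∈ q ++ [a]) := by
          intro x d hx
          rcases hc x d hx with h | ⟨h1, h2⟩
          · exact Or.inl h
          · exact Or.inr ⟨h1, by simp [h2]⟩
        have hb'' : ∀ d : Int, 1 ≤ d → b - d ∈ q ++ [a] →
            (dp.contains (b, d) = true → dp.getD (b, d) 0 = (chainLen nums d b : Int)) ∧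
            (dp.contains (b, d) = false → chainLen nums d b ≤ 2) := by
          intro d hd hbd
          by_cases hcase : d = b - a
          · subst hcase
            constructor
            · intro hcont
              exfalso
              rcases hc b (b - a) hcont with h | ⟨_, h2⟩
              · exact hbP h
              · have hba : b - (b - a) = a := by ring
                rw [hba] at h2
                exact haq h2
            · intro _
              omega
          · have hbq : b - d ∈ q := by
              rcases List.mem_append.mp hbd with h | h
              · exact h
              · exfalso
                have : b - d = a := by simpa using h
                exact hcase (by omega)
            exact hb' d hd hbq
        obtain ⟨c1, c2⟩ := ih (q ++ [a]) dp hassoc hc' hp hb''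
        refine ⟨?_, ?_⟩
        · rw [c1]
          constructor
          · rintro ⟨a', ha', hk'⟩; exact ⟨a', by simp [ha'], hk'⟩
          · rintro ⟨a', ha', hk'⟩
            rcases List.mem_cons.mp ha' with rfl | ha''
            · exact absurd hk' hke
            · exact ⟨a', ha'', hk'⟩
        · intro dp' hdp'
          obtain ⟨d1, d2, d3⟩ := c2 dp' hdp'
          refine ⟨?_, d2, ?_⟩
          · intro x d hx
            rcases d1 x d hx with h | ⟨h1, h2⟩
            · exact Or.inl h
            · exact Or.inr ⟨h1, by simpa using h2⟩
          · intro d hd hbd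
            exact d3 d hd (by simpa using hbd)

lemma outerB_spec (nums s vals : List Int) (hsm : ∀ x : Int, x ∈ s ↔ x ∈ nums) (k : Int)
    (hmem : ∀ x : Int, x ∈ vals ↔ x ∈ nums) (hpw : vals.Pairwise (· < ·)) :
    ∀ (r p : List Int) (dp : PySem.Dict (Int × Int) Int), p ++ r = vals →
      InvD nums p dp →
      (outerB s k p r dp = true ↔
        ∃ b ∈ r, ∃ a ∈ nums, a < b ∧ k ≤ ((chainLen nums (b - a) b : Nat) : Int)) := by
  intro r
  induction r with
  | nil => intro p dp _ _; simp [outerB]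
  | cons b r' ih =>
    intro p dp hpv hinv
    have hbv : b ∈ vals := by rw [← hpv]; simp
    have hbnum : b ∈ nums := (hmem b).mp hbv
    have hpwv : (p ++ b :: r').Pairwise (· < ·) := hpv ▸ hpw
    have hPnum : ∀ x ∈ p, x ∈ nums := fun x hx =>
      (hmem x).mp (by rw [← hpv]; exact List.mem_append.mpr (Or.inl hx))
    have hPlt : ∀ x ∈ p, x < b := fun x hx =>
      (List.pairwise_append.mp hpwv).2.2 x hx b (by simp)
    have hPnodup : p.Nodup := ((hpv ▸ hpw).sublist (List.sublist_append_left p (b :: r'))).nodup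
    have hPcomp : ∀ x ∈ nums, x < b → x ∈ p := by
      intro x hx hxb
      have hxv : x ∈ vals := (hmem x).mpr hx
      rw [← hpv] at hxv
      rcases List.mem_append.mp hxv with h | h
      · exact h
      · exfalso
        rcases List.mem_cons.mp h with h' | h'
        · omega
        · have := (List.pairwise_cons.mp (List.pairwise_append.mp hpwv).2.1).1 x h'
          omega
    obtain ⟨c1, c2⟩ := innerB_go nums s hsm k b hbnum p hPnum hPlt hPnodup p [] dp (by simp)
      (fun x d hx => Or.inl (hinv.1 x d hx)) hinv.2 (by intro d _ h; simp at h)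
    have hexa : (∃ a ∈ p, k ≤ ((chainLen nums (b - a) b : Nat) : Int)) ↔
        (∃ a ∈ nums, a < b ∧ k ≤ ((chainLen nums (b - a) b : Nat) : Int)) := by
      constructor
      · rintro ⟨a, ha, hk'⟩; exact ⟨a, hPnum a ha, hPlt a ha, hk'⟩
      · rintro ⟨a, ha, hab, hk'⟩; exact ⟨a, hPcomp a ha hab, hk'⟩
    cases hres : innerB s k b p dp with
    | none =>
      have houter : outerB s k p (b :: r') dp = true := by
        simp [outerB, hres]
      exact ⟨fun _ => ⟨b, by simp, hexa.mp (c1.mp hres)⟩, fun _ => houter⟩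
    | some dp' =>
      obtain ⟨d1, d2, d3⟩ := c2 dp' hres
      have hnone : ¬ ∃ a ∈ p, k ≤ ((chainLen nums (b - a) b : Nat) : Int) := by
        intro h
        rw [← c1] at h
        rw [hres] at h
        exact absurd h (by simp)
      have hinv' : InvD nums (p ++ [b]) dp' := by
        constructor
        · intro x d hx
          rcases d1 x d hx with h | ⟨h', _⟩
          · simp [h]
          · simp [h']
        · intro a ha d hd
          rcases List.mem_append.mp ha with h | h
          · exact d2 a h d hd
          · have hab : a = b := by simpa using h
            subst hab
            by_cases hbd : a - d ∈ nums
            · exact d3 d hd (by simpa using hPcomp (a - d) hbd (by omega))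
            · constructor
              · intro hcont
                exfalso
                rcases d1 a d hcont with h' | ⟨_, h'⟩
                · exact absurd (hPlt a h') (by omega)
                · exact hbd (hPnum _ (by simpa using h'))
              · intro _
                rw [chainLen_succ nums hd hbnum, chainLen_zero nums hbd]
                omega
      have houter : outerB s k p (b :: r') dp = outerB s k (p ++ [b]) r' dp' := by
        simp [outerB, hres]
      rw [houter, ih (p ++ [b]) dp' (by rw [← hpv]; simp) hinv']
      constructor
      · rintro ⟨b', hb', rest⟩
        exact ⟨b', by simp [hb'], rest⟩
      · rintro ⟨b', hb', a, ha, hab, hk'⟩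
        rcases List.mem_cons.mp hb' with rfl | hb''
        · exact absurd (hexa.mpr ⟨a, ha, hab, hk'⟩) hnone
        · exact ⟨b', hb'', a, ha, hab, hk'⟩

lemma B_eq (k : Int) (nums : List Int) (hk : ¬ k ≤ 1) :
    has_arithmetic_progression_alt k nums =
      outerB (PySem.Set.ofList nums) k ((valsOf nums).take 1) ((valsOf nums).drop 1)
        PySem.Dict.empty := by
  unfold has_arithmetic_progression_alt valsOf
  rw [if_neg hk]

lemma B_iff (k : Int) (nums : List Int) (hk : 2 ≤ k) :
    (has_arithmetic_progression_alt k nums = true ↔ hasAP nums k.toNat) := by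
  have hmem := valsOf_mem nums
  have hpw := valsOf_pairwise nums
  have hsm : ∀ x : Int, x ∈ PySem.Set.ofList nums ↔ x ∈ nums := fun x =>
    PySem.Set.mem_ofList nums x
  have hinv : InvD nums ((valsOf nums).take 1) PySem.Dict.empty := by
    constructor
    · intro x d hx; simp [PySem.Dict.contains_empty] at hx
    · intro a ha d hd
      have hanums : a ∈ nums := (hmem a).mp (List.mem_of_mem_take ha)
      have hnotmem : a - d ∉ nums := by
        intro hmem'
        have hadv : a - d ∈ valsOf nums := (hmem _).mpr hmem'
        obtain ⟨h, t, hht⟩ : ∃ h t, valsOf nums = h :: t := by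
          cases hv : valsOf nums with
          | nil => rw [hv] at ha; simp at ha
          | cons h t => exact ⟨h, t, rfl⟩
        have hah : a = h := by
          rw [hht] at ha; simpa using ha
        rw [hht] at hadv
        rcases List.mem_cons.mp hadv with h' | h'
        · omega
        · have := (List.pairwise_cons.mp (hht ▸ hpw)).1 (a - d) h'
          omega
      constructor
      · intro hcont; simp [PySem.Dict.contains_empty] at hcont
      · intro _
        rw [chainLen_succ nums hd hanums, chainLen_zero nums hnotmem]
        omega
  rw [B_eq k nums (by omega)]
  rw [outerB_spec nums (PySem.Set.ofList nums) (valsOf nums) hsm k hmem hpw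
    ((valsOf nums).drop 1) ((valsOf nums).take 1) PySem.Dict.empty
    (List.take_append_drop 1 (valsOf nums)) hinv]
  constructor
  · rintro ⟨b, hb, a, ha, hab, hk'⟩
    exact chain_to_AP nums hab (by omega)
  · intro h
    obtain ⟨a, b, hanums, hbnums, hab, hchain⟩ := AP_to_chain nums (by omega) h
    refine ⟨b, ?_, a, hanums, hab, by omega⟩
    have hbv : b ∈ valsOf nums := (hmem b).mpr hbnums
    obtain ⟨h0, t, hht⟩ : ∃ h0 t, valsOf nums = h0 :: t := by
      cases hv : valsOf nums with
      | nil => rw [hv] at hbv; simp at hbv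
      | cons h0 t => exact ⟨h0, t, rfl⟩
    have hav : a ∈ valsOf nums := (hmem a).mpr hanums
    have hbt : b ∈ t := by
      rw [hht] at hbv
      rcases List.mem_cons.mp hbv with h' | h'
      · exfalso
        rw [hht] at hav
        rcases List.mem_cons.mp hav with h'' | h''
        · omega
        · have := (List.pairwise_cons.mp (hht ▸ hpw)).1 a h''
          omega
      · exact h'
    rw [hht]; simpa using hbt

-- ===== bridging D_'s conditions to hasAP =====

lemma two_iff (nums : List Int) :
    (∃ x ∈ nums, ∃ y ∈ nums, x ≠ y) ↔ hasAP nums 2 := by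
  constructor
  · rintro ⟨x, hx, y, hy, hxy⟩
    rcases lt_or_gt_of_ne hxy with h | h
    · refine ⟨x, y - x, by omega, ?_⟩
      intro i hi
      interval_cases i
      · simpa using hx
      · have : x + ((1 : Nat) : Int) * (y - x) = y := by push_cast; ring
        rw [this]; exact hy
    · refine ⟨y, x - y, by omega, ?_⟩
      intro i hi
      interval_cases i
      · simpa using hy
      · have : y + ((1 : Nat) : Int) * (x - y) = x := by push_cast; ring
        rw [this]; exact hx
  · rintro ⟨a, d, hd, hall⟩
    refine ⟨a, by simpa using hall 0 (by omega), a + d, ?_, by omega⟩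
    have := hall 1 (by omega); push_cast at this; simpa using this

lemma ap3_iff (nums : List Int) :
    (∃ x ∈ nums, ∃ y ∈ nums, x < y ∧ y + (y - x) ∈ nums) ↔ hasAP nums 3 := by
  constructor
  · rintro ⟨x, hx, y, hy, hxy, hz⟩
    refine ⟨x, y - x, by omega, ?_⟩
    intro i hi
    interval_cases i
    · simpa using hx
    · have : x + ((1 : Nat) : Int) * (y - x) = y := by push_cast; ring
      rw [this]; exact hy
    · have : x + ((2 : Nat) : Int) * (y - x) = y + (y - x) := by push_cast; ring
      rw [this]; exact hz
  · rintro ⟨a, d, hd, hall⟩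
    refine ⟨a, by simpa using hall 0 (by omega), a + d, ?_, by omega, ?_⟩
    · have := hall 1 (by omega); push_cast at this; simpa using this
    · have := hall 2 (by omega)
      have heq : a + ((2 : Nat) : Int) * d = a + d + (a + d - a) := by push_cast; ring
      rwa [heq] at this

-- ===== VERDICT (by name: the statement is the Claim_ definition above) =====
theorem has_arithmetic_progression_spec : Claim_unchanged_has_arithmetic_progression := by
  intro k nums _ hnd
  by_cases hk1 : k ≤ 1
  · unfold has_arithmetic_progression has_arithmetic_progression_alt
    rw [if_pos hk1, if_pos hk1]
  · have hk2 : 2 ≤ k := by omega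
    have hA := A_iff k nums hk2
    have hB := B_iff k nums hk2
    by_cases hk3 : 3 ≤ k
    · have hmax : (max k 3).toNat = k.toNat := by
        rw [max_eq_left (by omega)]
      rw [hmax] at hA
      rcases hAB : has_arithmetic_progression_alt k nums with h | h
      · rcases h2 : has_arithmetic_progression k nums with h' | h'
        · rfl
        · exact absurd ((hB.mpr (hA.mp h2))) (by rw [hAB]; simp)
      · exact hA.mpr (hB.mp hAB)
    · have hk2' : k = 2 := by omega
      subst hk2'
      have hmax : (max (2 : Int) 3).toNat = 3 := by decide
      rw [hmax] at hA
      have hB2 : has_arithmetic_progression_alt 2 nums = true ↔ hasAP nums 2 := by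
        rw [hB]; exact Iff.rfl
      unfold D_has_arithmetic_progression at hnd
      push Not at hnd
      by_cases htwo : ∃ x ∈ nums, ∃ y ∈ nums, x ≠ y
      · have hap3 : ∃ x ∈ nums, ∃ y ∈ nums, x < y ∧ y + (y - x) ∈ nums := hnd rfl htwo
        have h3 : hasAP nums 3 := (ap3_iff nums).mp hap3
        rw [hA.mpr h3, hB2.mpr (hasAP_mono nums (by omega) h3)]
      · have hnB : has_arithmetic_progression_alt 2 nums = false := by
          rcases h : has_arithmetic_progression_alt 2 nums with _ | _
          · rfl
          · exact absurd ((two_iff nums).mpr (hB2.mp h)) htwo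
        have hnA : has_arithmetic_progression 2 nums = false := by
          rcases h : has_arithmetic_progression 2 nums with _ | _
          · rfl
          · exact absurd ((two_iff nums).mpr (hasAP_mono nums (by omega) (hA.mp h))) htwo
        rw [hnA, hnB]

theorem has_arithmetic_progression_changed : Claim_changed_has_arithmetic_progression := by
  unfold Claim_changed_has_arithmetic_progression; decide

theorem has_arithmetic_progression_tight : Claim_exact_has_arithmetic_progression := by
  intro k nums _ hD
  obtain ⟨hk2, htwo, hnoap3⟩ := hD
  subst hk2
  have hA := A_iff 2 nums (by omega)
  have hB := B_iff 2 nums (by omega)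
  have hmax : (max (2 : Int) 3).toNat = 3 := by decide
  rw [hmax] at hA
  have hB2 : has_arithmetic_progression_alt 2 nums = true ↔ hasAP nums 2 := by
    rw [hB]; exact Iff.rfl
  have hAfalse : has_arithmetic_progression 2 nums = false := by
    rcases h : has_arithmetic_progression 2 nums with _ | _
    · rfl
    · exact absurd ((ap3_iff nums).mpr (hA.mp h)) hnoap3
  have hBtrue : has_arithmetic_progression_alt 2 nums = true :=
    hB2.mpr ((two_iff nums).mp htwo)
  rw [hAfalse, hBtrue]
  simp
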